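-- pv_equiv track=rewrite | github.com/gustavoscotta1/atitus_pensComp_aulas | 12_Funcoes_e_imports/op_math/op_subtracao.py | subtracao
-- ===== SOURCE A (Python) =====
-- def subtracao(valor1: int, valor2: int) -> int:
--     def inverte_sinal(a: int) -> int:
--         return multiplicacao(a, -1)
--
--     def multiplicacao(a: int, b: int) -> int:
--         resultado = 0
--         negativo = False
--         if a < 0:
--             a = -a
--             negativo = not negativo
--         if b < 0:
--             b = -b
--             negativo = not negativo
--         for _ in range(b):
--             resultado += a
--         if negativo:
--             resultado = -resultado
--         return resultado
--
--     return valor1 + inverte_sinal(valor2)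
-- ===== SOURCE B (Python) =====
-- def subtracao(valor1: int, valor2: int) -> int:
--     return valor1 - valor2
-- ===== Notes on version B (the rewrite author's own statement) =====
-- stated objective: simpler
-- what changed: Replaced the nested helper that negates valor2 via a repeated-addition multiplication loop with the direct closed form valor1 - valor2.
import Mathlib
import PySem

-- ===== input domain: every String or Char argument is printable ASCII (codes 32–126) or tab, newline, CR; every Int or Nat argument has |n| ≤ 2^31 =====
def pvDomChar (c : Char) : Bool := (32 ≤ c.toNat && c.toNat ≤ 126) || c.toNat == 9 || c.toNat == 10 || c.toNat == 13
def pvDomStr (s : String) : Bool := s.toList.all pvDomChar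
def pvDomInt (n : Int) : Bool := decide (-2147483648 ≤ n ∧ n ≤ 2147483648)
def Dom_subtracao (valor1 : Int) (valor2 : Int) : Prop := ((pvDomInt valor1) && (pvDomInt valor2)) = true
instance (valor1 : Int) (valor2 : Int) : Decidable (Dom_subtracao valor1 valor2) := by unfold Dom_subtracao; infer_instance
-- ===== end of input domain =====

-- B replaces A's repeated-addition multiplication helper with the direct closed form valor1 - valor2 (simpler).
-- ===== PORT A =====
-- helper: multiplicacao(a, b) by repeated addition with sign bookkeeping (literal port)
def pvMultiplicacao (a : Int) (b : Int) : Int :=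
  let resultado : Int := 0
  let negativo : Bool := false
  let (a, negativo) := if a < 0 then (-a, !negativo) else (a, negativo)
  let (b, negativo) := if b < 0 then (-b, !negativo) else (b, negativo)
  let resultado := (PySem.List.pyRange 0 b 1).foldl (fun r _ => r + a) resultado
  if negativo then -resultado else resultado

-- helper: inverte_sinal(a) = multiplicacao(a, -1)
def pvInverteSinal (a : Int) : Int := pvMultiplicacao a (-1)

def subtracao (valor1 : Int) (valor2 : Int) : Int :=
  valor1 + pvInverteSinal valor2

-- ===== PORT B =====
def subtracao_alt (valor1 : Int) (valor2 : Int) : Int :=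
  valor1 - valor2

-- ===== PRECONDITION & SPEC =====
def Spec_subtracao (valor1 : Int) (valor2 : Int) (out : Int) : Prop := out = subtracao_alt valor1 valor2
instance (valor1 : Int) (valor2 : Int) (out : Int) : Decidable (Spec_subtracao valor1 valor2 out) := by unfold Spec_subtracao; infer_instance

-- ===== CLAIM (what is proved, stated in full; the proofs are below) =====
def Claim_equal_subtracao : Prop := ∀ (valor1 : Int) (valor2 : Int), Dom_subtracao valor1 valor2 → Spec_subtracao valor1 valor2 (subtracao valor1 valor2)

-- ===== LEMMAS AND PROOFS =====

-- ===== VERDICT (by name: the statement is the Claim_ definition above) =====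
-- For b = -1 the loop runs once, so pvMultiplicacao a (-1) = -a.
lemma pvMultiplicacao_neg_one (a : Int) : pvMultiplicacao a (-1) = -a := by
  unfold pvMultiplicacao
  by_cases h : a < 0 <;> simp [h, PySem.List.pyRange]

-- ===== VERDICT (by name: the statement is the Claim_ definition above) =====
theorem subtracao_spec : Claim_equal_subtracao := by
  intro v1 v2 _
  unfold Spec_subtracao subtracao subtracao_alt pvInverteSinal
  rw [pvMultiplicacao_neg_one]
  omega
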